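-- pv_equiv track=rewrite | github.com/linhdvu14/cp-sols | sols/AtCoder/abc238/B_Pizza.py | solve
-- ===== SOURCE A (Python) =====
-- def solve(N, A):
--     cuts = [0]
--     i = 0
--     for a in A:
--         i = (i + a) % 360
--         cuts.append(i)
--     cuts.append(360)
--
--     cuts.sort()
--     res = 0
--     for j, k in zip(cuts[1:], cuts):
--         res = max(res, j-k)
--     return res
-- ===== SOURCE B (Python) =====
-- def solve(N, A):
--     seen = [False] * 360
--     seen[0] = True
--     i = 0
--     for a in A:
--         i = (i + a) % 360
--         seen[i] = True
--     res = 0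
--     last = 0
--     for p in range(1, 360):
--         if seen[p]:
--             res = max(res, p - last)
--             last = p
--     return max(res, 360 - last)
-- ===== Notes on version B (the rewrite author's own statement) =====
-- stated objective: faster
-- what changed: Instead of collecting all cumulative cut angles into a list, sorting it and scanning adjacent differences, B marks each cut angle in a fixed 360-entry boolean table and finds the maximal gap with a single linear scan over the 360 positions.
import Mathlib
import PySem

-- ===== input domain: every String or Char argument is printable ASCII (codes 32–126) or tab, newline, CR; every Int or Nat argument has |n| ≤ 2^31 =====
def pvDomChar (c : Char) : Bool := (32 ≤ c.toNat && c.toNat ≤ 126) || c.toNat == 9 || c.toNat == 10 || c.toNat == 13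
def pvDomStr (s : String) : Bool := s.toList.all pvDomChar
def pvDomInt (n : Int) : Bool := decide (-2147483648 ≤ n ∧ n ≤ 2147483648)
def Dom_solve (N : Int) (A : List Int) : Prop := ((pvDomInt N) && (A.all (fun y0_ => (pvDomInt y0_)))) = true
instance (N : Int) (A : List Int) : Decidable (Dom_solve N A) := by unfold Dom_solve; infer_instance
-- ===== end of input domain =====

-- B replaces A's sort-and-scan over the cumulative cut angles by marking each angle
-- in a 360-entry boolean table and one linear scan for the maximal gap (measured faster).

-- ===== PORT A =====
def solve (N : Int) (A : List Int) : Int :=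
  let st := A.foldl (fun (s : List Int × Int) a =>
      let i := PySem.Int.mod (s.2 + a) 360
      (s.1 ++ [i], i)) ([0], 0)
  let cuts := st.1 ++ [360]
  let cuts := PySem.List.sorted cuts (fun x => x) false
  ((PySem.List.slice cuts (some 1) none).zip cuts).foldl
      (fun res jk => max res (jk.1 - jk.2)) 0

-- ===== PORT B =====
def solve_alt (N : Int) (A : List Int) : Int :=
  let seen0 := PySem.List.pySetD (List.replicate 360 false) 0 true
  let st := A.foldl (fun (s : List Bool × Int) a =>
      let i := PySem.Int.mod (s.2 + a) 360
      (PySem.List.pySetD s.1 i true, i)) (seen0, 0)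
  let fin := (PySem.List.pyRange 1 360 1).foldl
      (fun (rl : Int × Int) p =>
        if PySem.List.pyGetD st.1 p false then (max rl.1 (p - rl.2), p) else rl)
      (0, 0)
  max fin.1 (360 - fin.2)

-- ===== PRECONDITION & SPEC =====
def Spec_solve (N : Int) (A : List Int) (out : Int) : Prop := out = solve_alt N A
instance (N : Int) (A : List Int) (out : Int) : Decidable (Spec_solve N A out) := by unfold Spec_solve; infer_instance

-- ===== CLAIM (what is proved, stated in full; the proofs are below) =====
def Claim_equal_solve : Prop := ∀ (N : Int) (A : List Int), Dom_solve N A → Spec_solve N A (solve N A)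

-- ===== LEMMAS AND PROOFS =====

-- the successive values of the running angle i (each reduced mod 360)
def pvCum (i : Int) : List Int → List Int
  | [] => []
  | a :: rest => PySem.Int.mod (i + a) 360 :: pvCum (PySem.Int.mod (i + a) 360) rest

-- the two loop bodies of the ports, named so the fold lemmas can state them
def pvStepA (s : List Int × Int) (a : Int) : List Int × Int :=
  (s.1 ++ [PySem.Int.mod (s.2 + a) 360], PySem.Int.mod (s.2 + a) 360)

def pvStepB (s : List Bool × Int) (a : Int) : List Bool × Int :=
  (PySem.List.pySetD s.1 (PySem.Int.mod (s.2 + a) 360) true, PySem.Int.mod (s.2 + a) 360)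

-- the max-gap accumulator step shared by both proofs: state (res, last)
def pvU (s : Int × Int) (x : Int) : Int × Int := (max s.1 (x - s.2), x)

lemma pvCum_bounds : ∀ (A : List Int) (i x : Int), x ∈ pvCum i A → 0 ≤ x ∧ x < 360 := by
  intro A
  induction A with
  | nil => intro i x hx; simp [pvCum] at hx
  | cons a rest ih =>
    intro i x hx
    simp only [pvCum, List.mem_cons] at hx
    rcases hx with h | h
    · subst h
      exact ⟨PySem.Int.mod_nonneg _ (by norm_num), PySem.Int.mod_lt _ (by norm_num)⟩
    · exact ih _ _ h

lemma solve_foldl_eq : ∀ (A : List Int) (cuts : List Int) (i : Int),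
    A.foldl pvStepA (cuts, i) = (cuts ++ pvCum i A, (pvCum i A).getLastD i) := by
  intro A
  induction A with
  | nil => intro cuts i; simp [pvCum]
  | cons a rest ih =>
    intro cuts i
    simp only [List.foldl_cons, pvStepA, pvCum]
    rw [ih]
    refine Prod.ext (by simp) ?_
    exact (List.getLastD_cons (a := i)).symm

lemma alt_foldl_seen : ∀ (A : List Int) (seen : List Bool) (i : Int),
    seen.length = 360 →
    (A.foldl pvStepB (seen, i)).1.length = 360 ∧
     ∀ p : Int, 0 ≤ p → p < 360 →
       PySem.List.pyGetD (A.foldl pvStepB (seen, i)).1 p false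
        = (PySem.List.pyGetD seen p false || decide (p ∈ pvCum i A)) := by
  intro A
  induction A with
  | nil =>
    intro seen i hl
    refine ⟨hl, ?_⟩
    intro p hp0 hp; simp [pvCum]
  | cons a rest ih =>
    intro seen i hl
    simp only [List.foldl_cons, pvStepB]
    set j := PySem.Int.mod (i + a) 360 with hj
    have hj0 : 0 ≤ j := PySem.Int.mod_nonneg _ (by norm_num)
    have hj360 : j < 360 := PySem.Int.mod_lt _ (by norm_num)
    have hl' : (PySem.List.pySetD seen j true).length = 360 := by
      rw [PySem.List.length_pySetD, hl]
    obtain ⟨hlen, hmem⟩ := ih (PySem.List.pySetD seen j true) j hl'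
    refine ⟨hlen, ?_⟩
    intro p hp0 hp
    rw [hmem p hp0 hp]
    have hset : PySem.List.pyGetD (PySem.List.pySetD seen j true) p false
        = if p = j then true else PySem.List.pyGetD seen p false := by
      rw [PySem.List.pySetD_of_nonneg seen true hj0,
          PySem.List.pyGetD_eq_getElem (seen.set j.toNat true) false hp0 (by
            rw [List.length_set, hl]; exact_mod_cast hp),
          List.getElem_set]
      by_cases hpj : p = j
      · simp [hpj]
      · have hne : ¬ (j.toNat = p.toNat) := by
          intro h; apply hpj; omega
        rw [if_neg hne, if_neg hpj,
            PySem.List.pyGetD_eq_getElem seen false hp0 (by rw [hl]; exact_mod_cast hp)]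
    rw [hset]
    have hcons : pvCum i (a :: rest) = j :: pvCum j rest := by
      rw [show pvCum i (a :: rest)
            = PySem.Int.mod (i + a) 360 :: pvCum (PySem.Int.mod (i + a) 360) rest from rfl, ← hj]
    rw [hcons]
    by_cases hpj : p = j
    · subst hpj
      simp
    · simp [hpj]

lemma zip_fold_eq : ∀ (rest : List Int) (x r : Int),
    ((rest.zip (x :: rest)).foldl (fun res jk => max res (jk.1 - jk.2)) r)
      = (rest.foldl pvU (r, x)).1 := by
  intro rest
  induction rest with
  | nil => intro x r; simp
  | cons y rest' ih =>
    intro x r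
    simp only [List.zip_cons_cons, List.foldl_cons]
    exact ih y (max r (y - x))

-- core: folding the gap step over a weakly increasing list starting at (r, a)
-- equals folding it over the marked positions in (a, b)
lemma core_gap : ∀ (L : List Int), L.Pairwise (· ≤ ·) →
    ∀ (a r : Int) (b : Int), 0 ≤ r → (∀ x ∈ L, a ≤ x ∧ x < b) →
    L.foldl pvU (r, a)
      = ((PySem.List.pyRange (a+1) b 1).filter (fun p => decide (p ∈ L))).foldl pvU (r, a) := by
  intro L
  induction L with
  | nil =>
    intro _ a r b _ _
    simp
  | cons x rest ih =>
    intro hpw a r b hr hb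
    have hax : a ≤ x := (hb x (by simp)).1
    have hxb : x < b := (hb x (by simp)).2
    have hle : ∀ y ∈ rest, x ≤ y := fun y hy => (List.pairwise_cons.mp hpw).1 y hy
    have hpw' : rest.Pairwise (· ≤ ·) := (List.pairwise_cons.mp hpw).2
    by_cases hxa : x = a
    · subst hxa
      have hstep : pvU (r, x) x = (r, x) := by
        simp [pvU, max_eq_left hr]
      have hfc : (PySem.List.pyRange (x+1) b 1).filter (fun p => decide (p ∈ x :: rest))
          = (PySem.List.pyRange (x+1) b 1).filter (fun p => decide (p ∈ rest)) := by
        apply List.filter_congr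
        intro p hp
        have := (PySem.List.mem_pyRange_one.mp hp).1
        have hne : p ≠ x := by omega
        simp [hne]
      rw [List.foldl_cons, hstep, hfc]
      exact ih hpw' x r b hr (fun y hy => ⟨hle y hy, (hb y (by simp [hy])).2⟩)
    · have hax' : a < x := lt_of_le_of_ne hax (fun h => hxa h.symm)
      have hsplit : PySem.List.pyRange (a+1) b 1
          = PySem.List.pyRange (a+1) x 1 ++ (x :: PySem.List.pyRange (x+1) b 1) := by
        rw [PySem.List.pyRange_one_append (a+1) x b (by omega) (by omega),
            PySem.List.pyRange_one_cons hxb]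
      have hfilt1 : (PySem.List.pyRange (a+1) x 1).filter (fun p => decide (p ∈ x :: rest)) = [] := by
        apply List.filter_eq_nil_iff.mpr
        intro p hp
        have hpx := (PySem.List.mem_pyRange_one.mp hp).2
        simp only [decide_eq_true_eq, List.mem_cons, not_or]
        refine ⟨by omega, fun hpr => ?_⟩
        have := hle p hpr; omega
      have hfc : (PySem.List.pyRange (x+1) b 1).filter (fun p => decide (p ∈ x :: rest))
          = (PySem.List.pyRange (x+1) b 1).filter (fun p => decide (p ∈ rest)) := by
        apply List.filter_congr
        intro p hp
        have := (PySem.List.mem_pyRange_one.mp hp).1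
        have hne : p ≠ x := by omega
        simp [hne]
      rw [hsplit, List.filter_append, hfilt1, List.nil_append, List.filter_cons,
          if_pos (show decide (x ∈ x :: rest) = true by simp), hfc,
          List.foldl_cons, List.foldl_cons]
      have hstep : pvU (r, a) x = (max r (x - a), x) := rfl
      rw [hstep]
      exact ih hpw' x (max r (x - a)) b (le_trans hr (le_max_left _ _))
        (fun y hy => ⟨hle y hy, (hb y (by simp [hy])).2⟩)

-- sorted(0 :: M ++ [360]) = 0 :: sorted(M) ++ [360] when M ⊆ [0, 360)
lemma sorted_cuts_eq (M : List Int) (hM : ∀ x ∈ M, 0 ≤ x ∧ x < 360) :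
    PySem.List.sorted ((0 :: M) ++ [360]) (fun x => x) false
      = 0 :: (PySem.List.sorted M (fun x => x) false ++ [360]) := by
  apply List.Perm.eq_of_pairwise (le := fun (a b : Int) => a ≤ b)
  · intro a b _ _ h1 h2
    omega
  · have := PySem.List.sorted_pairwise ((0 :: M) ++ [360]) (fun x => x)
    simpa using this
  · rw [List.pairwise_cons]
    constructor
    · intro y hy
      rcases List.mem_append.mp hy with h | h
      · exact (hM y ((PySem.List.mem_sorted M _ _ y).mp h)).1
      · simp at h; omega
    · rw [List.pairwise_append]
      refine ⟨by simpa using PySem.List.sorted_pairwise M (fun x => x), by simp, ?_⟩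
      intro y hy z hz
      simp at hz; subst hz
      exact le_of_lt (hM y ((PySem.List.mem_sorted M _ _ y).mp hy)).2
  · exact (PySem.List.sorted_perm _ _ _).trans (by
      have h : (M ++ [360]).Perm (PySem.List.sorted M (fun x => x) false ++ [360]) :=
        List.Perm.append ((PySem.List.sorted_perm M _ _).symm) (List.Perm.refl _)
      simpa using List.Perm.cons 0 h)

lemma seen0_len : (PySem.List.pySetD (List.replicate 360 false) 0 true).length = 360 := by
  rw [PySem.List.length_pySetD, List.length_replicate]

lemma seen0_get (p : Int) (h1 : 1 ≤ p) (h2 : p < 360) :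
    PySem.List.pyGetD (PySem.List.pySetD (List.replicate 360 false) 0 true) p false = false := by
  rw [PySem.List.pySetD_of_nonneg _ _ (le_refl 0),
      PySem.List.pyGetD_eq_getElem _ false (by omega)
        (by rw [List.length_set, List.length_replicate]; exact_mod_cast h2),
      List.getElem_set]
  have hne : ¬ ((0:Int).toNat = p.toNat) := by omega
  rw [if_neg hne, List.getElem_replicate]

-- ===== VERDICT (by name: the statement is the Claim_ definition above) =====
theorem solve_spec : Claim_equal_solve := by
  intro N A _
  unfold Spec_solve solve solve_alt
  have eA : (fun (s : List Int × Int) a =>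
      let i := PySem.Int.mod (s.2 + a) 360
      (s.1 ++ [i], i)) = pvStepA := rfl
  have eB : (fun (s : List Bool × Int) a =>
      let i := PySem.Int.mod (s.2 + a) 360
      (PySem.List.pySetD s.1 i true, i)) = pvStepB := rfl
  rw [eA, eB]
  dsimp only
  have hbounds : ∀ x ∈ pvCum 0 A, 0 ≤ x ∧ x < 360 := fun x hx => pvCum_bounds A 0 x hx
  have hSb : ∀ x ∈ PySem.List.sorted (pvCum 0 A) (fun x => x) false, 0 ≤ x ∧ x < 360 :=
    fun x hx => hbounds x ((PySem.List.mem_sorted _ _ _ x).mp hx)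
  -- A side
  rw [solve_foldl_eq A [0] 0]
  dsimp only
  have hcuts : ([0] ++ pvCum 0 A) ++ [360] = (0 :: pvCum 0 A) ++ [360] := by simp
  rw [hcuts, sorted_cuts_eq (pvCum 0 A) hbounds, PySem.List.slice_from_one, List.tail_cons,
      zip_fold_eq _ 0 0, List.foldl_append]
  -- B side
  obtain ⟨hlen, hmem⟩ :=
    alt_foldl_seen A (PySem.List.pySetD (List.replicate 360 false) 0 true) 0 seen0_len
  rw [← List.foldl_filter]
  rw [show (fun (x : Int × Int) (y : Int) => (max x.1 (y - x.2), y)) = pvU from rfl]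
  have hfc1 : (PySem.List.pyRange 1 360 1).filter
        (fun p => PySem.List.pyGetD
          (A.foldl pvStepB (PySem.List.pySetD (List.replicate 360 false) 0 true, 0)).1 p false)
      = (PySem.List.pyRange 1 360 1).filter
          (fun p => decide (p ∈ PySem.List.sorted (pvCum 0 A) (fun x => x) false)) := by
    apply List.filter_congr
    intro p hp
    obtain ⟨h1, h2⟩ := PySem.List.mem_pyRange_one.mp hp
    rw [hmem p (by omega) h2, seen0_get p h1 h2, Bool.false_or]
    simp [PySem.List.mem_sorted]
  rw [hfc1]
  have hpw : (PySem.List.sorted (pvCum 0 A) (fun x => x) false).Pairwise (· ≤ ·) := by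
    simpa using PySem.List.sorted_pairwise (pvCum 0 A) (fun x => x)
  have hcore := core_gap (PySem.List.sorted (pvCum 0 A) (fun x => x) false) hpw 0 0 360
    (le_refl 0) hSb
  rw [(by norm_num : (0:Int)+1 = 1)] at hcore
  rw [← hcore]
  rfl
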